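-- pv_equiv track=rewrite | github.com/lijingcheng2021/OmAgent | omagent-core/src/omagent_core/advanced_components/workflow/react/agent/action/action.py | _get_step_number
-- ===== SOURCE A (Python) =====
-- def _get_step_number(context: str) -> int:
--     """Get the next step number based on context"""
--     if not context:
--         return 1
--
--     # 按行分割上下文
--     lines = context.split('\n')
--     step_count = 0
--
--     # 遍历每一行，检查是否是步骤标记
--     for line in lines:
--         line = line.strip()
--         # 检查行是否以步骤标记开始（标记词 + 空格 + 数字）
--         if any(line.startswith(f"{marker} ") and any(c.isdigit() for c in line)
--               for marker in ['Thought', 'Action', 'Observation']):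
--             step_count += 1
--
--     # 返回下一个步骤号
--     return (step_count // 3) + 1  # 每组三个步骤（Thought/Action/Observation）共享同一个编号
-- ===== SOURCE B (Python) =====
-- def _get_step_number(context: str) -> int:
--     """Single pass over the characters: a small per-line state machine.
--     mode 0 = skipping leading whitespace, 1 = matching the marker word,
--     2 = marker matched, waiting for a digit, 3 = line counts, -1 = dead line."""
--     count = 0
--     mode = 0
--     rest = ''  # marker characters still to match in mode 1
--     for ch in context + '\n':
--         if ch == '\n':
--             if mode == 3:
--                 count += 1
--             mode = 0
--             rest = ''
--         elif mode == 0: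
--             if ch.isspace():
--                 pass
--             elif ch == 'T':
--                 rest, mode = 'hought ', 1
--             elif ch == 'A':
--                 rest, mode = 'ction ', 1
--             elif ch == 'O':
--                 rest, mode = 'bservation ', 1
--             else:
--                 mode = -1
--         elif mode == 1:
--             if ch == rest[0]:
--                 rest = rest[1:]
--                 if not rest:
--                     mode = 2
--             else:
--                 mode = -1
--         elif mode == 2:
--             if ch.isdigit():
--                 mode = 3
--     return count // 3 + 1
-- ===== Notes on version B (the rewrite author's own statement) =====
-- stated objective: alternative
-- what changed: Replaces the split-into-lines loop with per-line strip/startswith/any-digit checks by a single character-level state machine that scans the string once with constant extra memory and no intermediate line list.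
import Mathlib
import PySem

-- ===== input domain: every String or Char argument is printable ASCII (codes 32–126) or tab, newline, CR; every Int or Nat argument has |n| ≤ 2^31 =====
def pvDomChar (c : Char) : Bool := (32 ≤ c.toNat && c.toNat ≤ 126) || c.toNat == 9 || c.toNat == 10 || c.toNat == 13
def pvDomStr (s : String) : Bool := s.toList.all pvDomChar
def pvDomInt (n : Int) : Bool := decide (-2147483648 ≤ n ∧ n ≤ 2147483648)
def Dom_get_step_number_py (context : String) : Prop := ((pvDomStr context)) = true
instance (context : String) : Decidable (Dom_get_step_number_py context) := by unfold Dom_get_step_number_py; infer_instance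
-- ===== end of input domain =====

-- B replaces A's split-into-lines + per-line strip/startswith/digit checks by a single
-- character-level state machine over the string (alternative: same cost, one pass, no line list).

-- ===== PORT A =====
def get_step_number_py (context : String) : Int :=
  if context = "" then 1
  else
    let lines := (PySem.Str.split? context "\n").getD []
    let step_count : Int := lines.foldl (fun acc line =>
      let line := PySem.Str.strip line
      if ["Thought", "Action", "Observation"].any (fun marker =>
            PySem.Str.startswith line (marker ++ " ") && line.toList.any PySem.Chars.isdigit)
      then acc + 1 else acc) 0
    PySem.Int.floordiv step_count 3 + 1

-- ===== PORT B =====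
-- state = (count, mode, rest); modes as in Source B: 0 skip leading ws, 1 matching marker,
-- 2 waiting for a digit, 3 line counts, -1 dead line
def pvStep (s : Int × Int × List Char) (ch : Char) : Int × Int × List Char :=
  let (count, mode, rest) := s
  if ch = '\n' then
    (if mode = 3 then count + 1 else count, 0, [])
  else if mode = 0 then
    if PySem.Chars.isspace ch then (count, mode, rest)
    else if ch = 'T' then (count, 1, "hought ".toList)
    else if ch = 'A' then (count, 1, "ction ".toList)
    else if ch = 'O' then (count, 1, "bservation ".toList)
    else (count, -1, rest)
  else if mode = 1 then
    match rest with
    | r :: rs =>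
      if ch = r then
        if rs = [] then (count, 2, rs) else (count, 1, rs)
      else (count, -1, rest)
    | [] => (count, -1, rest)   -- unreachable: in mode 1 rest is nonempty (Python would raise on rest[0])
  else if mode = 2 then
    if PySem.Chars.isdigit ch then (count, 3, rest) else (count, mode, rest)
  else (count, mode, rest)

def get_step_number_py_alt (context : String) : Int :=
  let fin := (context ++ "\n").toList.foldl pvStep (0, 0, [])
  PySem.Int.floordiv fin.1 3 + 1

-- ===== PRECONDITION & SPEC =====
def Spec_get_step_number_py (context : String) (out : Int) : Prop := out = get_step_number_py_alt context
instance (context : String) (out : Int) : Decidable (Spec_get_step_number_py context out) := by unfold Spec_get_step_number_py; infer_instance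

-- ===== CLAIM (what is proved, stated in full; the proofs are below) =====
def Claim_equal_get_step_number_py : Prop := ∀ (context : String), Dom_get_step_number_py context → Spec_get_step_number_py context (get_step_number_py context)

-- ===== LEMMAS AND PROOFS =====

-- A's per-line condition, on char lists
def pvLineB (l : List Char) : Bool :=
  ["Thought", "Action", "Observation"].any (fun marker =>
    PySem.Chars.startswith (PySem.Chars.strip l) (marker ++ " ").toList &&
    (PySem.Chars.strip l).any PySem.Chars.isdigit)

-- structural recursion computing s.split('\n'): first line and remaining lines
def pvSplit : List Char → List Char × List (List Char)
  | [] => ([], [])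
  | c :: s => if c = '\n' then ([], (pvSplit s).1 :: (pvSplit s).2) else (c :: (pvSplit s).1, (pvSplit s).2)

def pvLines (s : List Char) : List (List Char) := (pvSplit s).1 :: (pvSplit s).2

theorem pvSplit_go (fuel : Nat) (l cur : List Char) (acc : List (List Char)) (h : l.length < fuel) :
    PySem.Chars.splitOn.go ['\n'] fuel l cur acc
      = acc.reverse ++ (cur.reverse ++ (pvSplit l).1) :: (pvSplit l).2 := by
  induction fuel generalizing l cur acc with
  | zero => omega
  | succ fuel ih =>
    cases l with
    | nil => simp [PySem.Chars.splitOn.go, pvSplit]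
    | cons ch rest =>
      by_cases hc : ch = '\n'
      · subst hc
        have h1 : ['\n'].isPrefixOf ('\n' :: rest) = true := by simp [List.isPrefixOf]
        simp only [PySem.Chars.splitOn.go, h1, if_pos, List.length_cons, List.length_nil,
          List.drop_succ_cons, List.drop_zero]
        rw [ih rest [] ((cur.reverse) :: acc) (by simpa using Nat.lt_of_succ_lt_succ h)]
        simp [pvSplit]
      · have h1 : ['\n'].isPrefixOf (ch :: rest) = false := by
          simp [List.isPrefixOf]
          exact fun hh => hc hh.symm
        simp only [PySem.Chars.splitOn.go, h1]
        rw [ih rest (ch :: cur) acc (by simpa using Nat.lt_of_succ_lt_succ h)]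
        simp [pvSplit, hc]

theorem pvSplitOn_eq (s : List Char) :
    PySem.Chars.splitOn s ['\n'] = (pvSplit s).1 :: (pvSplit s).2 := by
  have := pvSplit_go (s.length + 1) s [] [] (by omega)
  simpa [PySem.Chars.splitOn] using this

theorem pvSplit_no_nl (s : List Char) (h : '\n' ∉ s) : pvSplit s = (s, []) := by
  induction s with
  | nil => simp [pvSplit]
  | cons c s ih =>
    have hc : c ≠ '\n' := fun hc => h (hc ▸ List.mem_cons_self)
    simp only [pvSplit, if_neg hc, ih (fun hm => h (List.mem_cons_of_mem _ hm))]

theorem pvSplit_append (a b : List Char) (h : '\n' ∉ a) :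
    pvSplit (a ++ '\n' :: b) = (a, (pvSplit b).1 :: (pvSplit b).2) := by
  induction a with
  | nil => simp [pvSplit]
  | cons c a ih =>
    have hc : c ≠ '\n' := fun hc => h (hc ▸ List.mem_cons_self)
    simp only [List.cons_append, pvSplit, if_neg hc,
      ih (fun hm => h (List.mem_cons_of_mem _ hm))]

-- strip / rstrip toolbox
theorem pv_space_not_digit (c : Char) (h : PySem.Chars.isspace c = true) :
    PySem.Chars.isdigit c = false := by
  have hd : PySem.Chars.isdigit c = true → 48 ≤ c.toNat ∧ c.toNat ≤ 57 := by
    simp only [PySem.Chars.isdigit, Bool.and_eq_true, decide_eq_true_eq, Char.le_def,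
      UInt32.le_iff_toNat_le, Char.toNat]
    intro hh
    exact hh
  simp only [PySem.Chars.isspace, Bool.or_eq_true, Bool.and_eq_true, decide_eq_true_eq] at h
  cases hb : PySem.Chars.isdigit c
  · rfl
  · exact absurd h (by have := hd hb; omega)

theorem pv_rstrip_prefix (l : List Char) : PySem.Chars.rstrip l <+: l := by
  obtain ⟨t, ht⟩ := List.dropWhile_suffix (l := l.reverse) (p := PySem.Chars.isspace)
  refine ⟨t.reverse, ?_⟩
  have : (t ++ List.dropWhile PySem.Chars.isspace l.reverse).reverse = l.reverse.reverse := by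
    rw [ht]
  simpa [PySem.Chars.rstrip, List.reverse_append] using this

theorem pv_rstrip_decomp (l : List Char) :
    ∃ w, l = PySem.Chars.rstrip l ++ w ∧ ∀ c ∈ w, PySem.Chars.isspace c = true := by
  refine ⟨(l.reverse.takeWhile PySem.Chars.isspace).reverse, ?_, ?_⟩
  · have h1 : l.reverse.takeWhile PySem.Chars.isspace ++ l.reverse.dropWhile PySem.Chars.isspace = l.reverse :=
      List.takeWhile_append_dropWhile
    have h2 := congrArg List.reverse h1
    rw [List.reverse_append, List.reverse_reverse] at h2
    rw [PySem.Chars.rstrip]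
    exact h2.symm
  · intro c hc
    exact List.mem_takeWhile_imp (List.mem_reverse.mp hc)

theorem pv_any_isdigit_rstrip (l : List Char) :
    (PySem.Chars.rstrip l).any PySem.Chars.isdigit = l.any PySem.Chars.isdigit := by
  obtain ⟨w, hw, hsp⟩ := pv_rstrip_decomp l
  have hwno : w.any PySem.Chars.isdigit = false := by
    simp only [List.any_eq_false]
    intro c hc
    simp [pv_space_not_digit c (hsp c hc)]
  conv_rhs => rw [hw]
  simp [List.any_append, hwno]

theorem pv_rstrip_ne_nil (l : List Char) (h : l.any PySem.Chars.isdigit = true) :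
    PySem.Chars.rstrip l ≠ [] := by
  intro hnil
  have := pv_any_isdigit_rstrip l
  rw [hnil, h] at this
  simp at this

theorem pv_rstrip_append (a t : List Char) (h : PySem.Chars.rstrip t ≠ []) :
    PySem.Chars.rstrip (a ++ t) = a ++ PySem.Chars.rstrip t := by
  have hne : (t.reverse.dropWhile PySem.Chars.isspace).isEmpty = false := by
    rw [List.isEmpty_eq_false_iff]
    intro hnil
    exact h (by simp [PySem.Chars.rstrip, hnil])
  simp [PySem.Chars.rstrip, List.reverse_append, List.dropWhile_append, hne]

theorem pv_strip_cons_space (c : Char) (l : List Char) (h : PySem.Chars.isspace c = true) :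
    PySem.Chars.strip (c :: l) = PySem.Chars.strip l := by
  simp [PySem.Chars.strip, PySem.Chars.lstrip, h]

theorem pv_strip_cons_nonspace (c : Char) (l : List Char) (h : PySem.Chars.isspace c = false) :
    PySem.Chars.strip (c :: l) = PySem.Chars.rstrip (c :: l) := by
  simp [PySem.Chars.strip, PySem.Chars.lstrip, h]

-- single-step evaluation lemmas
theorem pvStep_nl (cnt mode : Int) (rest : List Char) :
    pvStep (cnt, mode, rest) '\n' = (if mode = 3 then cnt + 1 else cnt, 0, []) := by
  simp [pvStep]

theorem pvStep_m3 {a : Char} (ha : a ≠ '\n') (cnt : Int) (r : List Char) :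
    pvStep (cnt, 3, r) a = (cnt, 3, r) := by
  simp [pvStep, ha]

theorem pvStep_mDead {a : Char} (ha : a ≠ '\n') (cnt : Int) (r : List Char) :
    pvStep (cnt, -1, r) a = (cnt, -1, r) := by
  simp [pvStep, ha]

theorem pvStep_m2 {a : Char} (ha : a ≠ '\n') (cnt : Int) (r : List Char) :
    pvStep (cnt, 2, r) a = (if PySem.Chars.isdigit a then (cnt, 3, r) else (cnt, 2, r)) := by
  by_cases hd : PySem.Chars.isdigit a = true <;> simp [pvStep, ha, hd]

theorem pvStep_m1 {a : Char} (ha : a ≠ '\n') (cnt : Int) (p : Char) (ps : List Char) :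
    pvStep (cnt, 1, p :: ps) a
      = (if a = p then (if ps = [] then (cnt, 2, ps) else (cnt, 1, ps)) else (cnt, -1, p :: ps)) := by
  by_cases hap : a = p
  · subst hap
    cases ps <;> simp [pvStep, ha]
  · simp [pvStep, ha, hap]

-- machine run lemmas
theorem pv_run3 (l : List Char) (h : '\n' ∉ l) (c : Int) (r : List Char) :
    List.foldl pvStep (c, 3, r) (l ++ ['\n']) = (c + 1, 0, []) := by
  induction l generalizing r with
  | nil => simp [List.foldl_cons, pvStep_nl]
  | cons a l ih =>
    have ha : a ≠ '\n' := fun hh => h (hh ▸ List.mem_cons_self)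
    have h' : '\n' ∉ l := fun hm => h (List.mem_cons_of_mem _ hm)
    rw [List.cons_append, List.foldl_cons, pvStep_m3 ha, ih h' r]

theorem pv_runDead (l : List Char) (h : '\n' ∉ l) (c : Int) (r : List Char) :
    List.foldl pvStep (c, -1, r) (l ++ ['\n']) = (c, 0, []) := by
  induction l generalizing r with
  | nil => simp [List.foldl_cons, pvStep_nl]
  | cons a l ih =>
    have ha : a ≠ '\n' := fun hh => h (hh ▸ List.mem_cons_self)
    have h' : '\n' ∉ l := fun hm => h (List.mem_cons_of_mem _ hm)
    rw [List.cons_append, List.foldl_cons, pvStep_mDead ha, ih h' r]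

theorem pv_run2 (l : List Char) (h : '\n' ∉ l) (c : Int) (r : List Char) :
    List.foldl pvStep (c, 2, r) (l ++ ['\n'])
      = (c + (if l.any PySem.Chars.isdigit then 1 else 0), 0, []) := by
  induction l generalizing r with
  | nil => simp [List.foldl_cons, pvStep_nl]
  | cons a l ih =>
    have ha : a ≠ '\n' := fun hh => h (hh ▸ List.mem_cons_self)
    have h' : '\n' ∉ l := fun hm => h (List.mem_cons_of_mem _ hm)
    rw [List.cons_append, List.foldl_cons, pvStep_m2 ha]
    by_cases hd : PySem.Chars.isdigit a = true
    · rw [if_pos hd, pv_run3 l h' c r]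
      simp [List.any_cons, hd]
    · rw [if_neg hd, ih h' r]
      simp only [Bool.not_eq_true] at hd
      simp [List.any_cons, hd]

theorem pv_run1 (l : List Char) (h : '\n' ∉ l) (p : Char) (ps : List Char) (c : Int) :
    List.foldl pvStep (c, 1, p :: ps) (l ++ ['\n'])
      = (c + (if (p :: ps).isPrefixOf l ∧ (l.drop (p :: ps).length).any PySem.Chars.isdigit then 1 else 0), 0, []) := by
  induction l generalizing p ps c with
  | nil => simp [List.foldl_cons, pvStep_nl, List.isPrefixOf]
  | cons a l ih =>
    have ha : a ≠ '\n' := fun hh => h (hh ▸ List.mem_cons_self)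
    have h' : '\n' ∉ l := fun hm => h (List.mem_cons_of_mem _ hm)
    rw [List.cons_append, List.foldl_cons, pvStep_m1 ha]
    by_cases hap : a = p
    · subst hap
      cases ps with
      | nil =>
        rw [if_pos rfl, if_pos rfl, pv_run2 l h' c []]
        simp [List.isPrefixOf]
      | cons q qs =>
        rw [if_pos rfl, if_neg (by simp), ih h' q qs c]
        simp [List.isPrefixOf]
    · rw [if_neg hap, pv_runDead l h' c (p :: ps)]
      have hpre : (p :: ps).isPrefixOf (a :: l) = false := by
        simp [List.isPrefixOf]
        intro hh
        exact absurd hh.symm hap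
      simp [hpre]

theorem pvStep_m0 {a : Char} (ha : a ≠ '\n') (cnt : Int) (r : List Char) :
    pvStep (cnt, 0, r) a
      = (if PySem.Chars.isspace a then (cnt, 0, r)
         else if a = 'T' then (cnt, 1, "hought ".toList)
         else if a = 'A' then (cnt, 1, "ction ".toList)
         else if a = 'O' then (cnt, 1, "bservation ".toList)
         else (cnt, -1, r)) := by
  simp [pvStep, ha]

-- a marker whose first letter differs from the line's first (non-space) char never matches
theorem pv_other_marker (m0 c0 : Char) (M' l : List Char) (hne : m0 ≠ c0)
    (hsp : PySem.Chars.isspace c0 = false) :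
    ¬ ((m0 :: M').isPrefixOf (PySem.Chars.strip (c0 :: l)) = true) := by
  rw [pv_strip_cons_nonspace c0 l hsp]
  intro hpre
  rw [List.isPrefixOf_iff_prefix] at hpre
  have hR := pv_rstrip_prefix (c0 :: l)
  cases hr : PySem.Chars.rstrip (c0 :: l) with
  | nil => rw [hr] at hpre; exact absurd (List.prefix_nil.mp hpre) (by simp)
  | cons r R' =>
    rw [hr] at hpre hR
    have h1 : r = c0 := (List.cons_prefix_cons.mp hR).1
    have h2 : m0 = r := (List.cons_prefix_cons.mp hpre).1
    exact hne (h1 ▸ h2)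

-- the marker whose first letter is the line's first char matches iff the machine's condition holds
theorem pv_marker_bridge (c0 : Char) (Mt l : List Char)
    (hsp : PySem.Chars.isspace c0 = false)
    (hnd : (c0 :: Mt).any PySem.Chars.isdigit = false) :
    ((c0 :: Mt).isPrefixOf (PySem.Chars.strip (c0 :: l)) = true ∧
      (PySem.Chars.strip (c0 :: l)).any PySem.Chars.isdigit = true)
    ↔ (Mt.isPrefixOf l = true ∧ (l.drop Mt.length).any PySem.Chars.isdigit = true) := by
  rw [pv_strip_cons_nonspace c0 l hsp]
  rw [List.isPrefixOf_iff_prefix, List.isPrefixOf_iff_prefix, pv_any_isdigit_rstrip]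
  constructor
  · rintro ⟨hpre, hdig⟩
    have hpre' : (c0 :: Mt) <+: (c0 :: l) := hpre.trans (pv_rstrip_prefix _)
    have hMt : Mt <+: l := (List.cons_prefix_cons.mp hpre').2
    obtain ⟨t, ht⟩ := (List.cons_prefix_cons.mp hpre').2
    have hdrop : l.drop Mt.length = t := by rw [← ht, List.drop_left]
    refine ⟨hMt, ?_⟩
    rw [hdrop]
    simp only [List.any_cons, Bool.or_eq_false_iff] at hnd
    rw [← ht] at hdig
    simp only [List.any_cons, List.any_append, Bool.or_eq_true] at hdig
    rcases hdig with hdig | hdig | hdig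
    · rw [hnd.1] at hdig; exact absurd hdig (by simp)
    · rw [hnd.2] at hdig; exact absurd hdig (by simp)
    · exact hdig
  · rintro ⟨hMt, hdig⟩
    obtain ⟨t, ht⟩ := hMt
    have hdrop : l.drop Mt.length = t := by rw [← ht, List.drop_left]
    rw [hdrop] at hdig
    have htne : PySem.Chars.rstrip t ≠ [] := pv_rstrip_ne_nil t hdig
    have hsplit : (c0 :: l) = (c0 :: Mt) ++ t := by simp [← ht]
    constructor
    · rw [hsplit, pv_rstrip_append _ _ htne]
      exact List.prefix_append _ _
    · rw [hsplit, List.any_append, hdig]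
      simp

theorem pv_run0 (l : List Char) (h : '\n' ∉ l) (c : Int) (r : List Char) :
    List.foldl pvStep (c, 0, r) (l ++ ['\n'])
      = (c + (if pvLineB l then 1 else 0), 0, []) := by
  induction l generalizing r with
  | nil =>
    rw [show pvLineB [] = false from by decide]
    simp [List.foldl_cons, pvStep_nl]
  | cons a l ih =>
    have ha : a ≠ '\n' := fun hh => h (hh ▸ List.mem_cons_self)
    have h' : '\n' ∉ l := fun hm => h (List.mem_cons_of_mem _ hm)
    rw [List.cons_append, List.foldl_cons, pvStep_m0 ha]
    by_cases hs : PySem.Chars.isspace a = true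
    · rw [if_pos hs, ih h' r]
      simp [pvLineB, pv_strip_cons_space a l hs]
    · rw [if_neg hs]
      simp only [Bool.not_eq_true] at hs
      by_cases hT : a = 'T'
      · subst hT
        rw [if_pos rfl]
        rw [show ("hought ".toList) = 'h' :: "ought ".toList from by decide]
        rw [pv_run1 l h' 'h' "ought ".toList c]
        have hiff := pv_marker_bridge 'T' ('h' :: "ought ".toList) l hs (by decide)
        have hA := pv_other_marker 'A' 'T' "ction ".toList l (by decide) hs
        have hO := pv_other_marker 'O' 'T' "bservation ".toList l (by decide) hs
        have hlb : pvLineB ('T' :: l) = true ↔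
            (('h' :: "ought ".toList).isPrefixOf l = true ∧
              (l.drop ('h' :: "ought ".toList).length).any PySem.Chars.isdigit = true) := by
          simp only [pvLineB]
          simp only [List.any_cons, List.any_nil, Bool.or_false, Bool.or_eq_true,
            Bool.and_eq_true, PySem.Chars.startswith]
          rw [show (("Thought" ++ " ").toList) = 'T' :: 'h' :: "ought ".toList from by decide,
            show (("Action" ++ " ").toList) = 'A' :: "ction ".toList from by decide,
            show (("Observation" ++ " ").toList) = 'O' :: "bservation ".toList from by decide]
          constructor
          · rintro (⟨h1, h2⟩ | ⟨h1, _⟩ | ⟨h1, _⟩)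
            · exact hiff.mp ⟨h1, h2⟩
            · exact absurd h1 hA
            · exact absurd h1 hO
          · intro hx
            exact Or.inl (hiff.mpr hx)
        rw [if_congr hlb.symm rfl rfl]
      · by_cases hA' : a = 'A'
        · subst hA'
          rw [if_neg (by decide), if_pos rfl]
          rw [show ("ction ".toList) = 'c' :: "tion ".toList from by decide]
          rw [pv_run1 l h' 'c' "tion ".toList c]
          have hiff := pv_marker_bridge 'A' ('c' :: "tion ".toList) l hs (by decide)
          have hT2 := pv_other_marker 'T' 'A' ('h' :: "ought ".toList) l (by decide) hs
          have hO := pv_other_marker 'O' 'A' "bservation ".toList l (by decide) hs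
          have hlb : pvLineB ('A' :: l) = true ↔
              (('c' :: "tion ".toList).isPrefixOf l = true ∧
                (l.drop ('c' :: "tion ".toList).length).any PySem.Chars.isdigit = true) := by
            simp only [pvLineB]
            simp only [List.any_cons, List.any_nil, Bool.or_false, Bool.or_eq_true,
              Bool.and_eq_true, PySem.Chars.startswith]
            rw [show (("Thought" ++ " ").toList) = 'T' :: 'h' :: "ought ".toList from by decide,
              show (("Action" ++ " ").toList) = 'A' :: 'c' :: "tion ".toList from by decide,
              show (("Observation" ++ " ").toList) = 'O' :: "bservation ".toList from by decide]
            constructor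
            · rintro (⟨h1, _⟩ | ⟨h1, h2⟩ | ⟨h1, _⟩)
              · exact absurd h1 hT2
              · exact hiff.mp ⟨h1, h2⟩
              · exact absurd h1 hO
            · intro hx
              exact Or.inr (Or.inl (hiff.mpr hx))
          rw [if_congr hlb.symm rfl rfl]
        · by_cases hO' : a = 'O'
          · subst hO'
            rw [if_neg (by decide), if_neg (by decide), if_pos rfl]
            rw [show ("bservation ".toList) = 'b' :: "servation ".toList from by decide]
            rw [pv_run1 l h' 'b' "servation ".toList c]
            have hiff := pv_marker_bridge 'O' ('b' :: "servation ".toList) l hs (by decide)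
            have hT2 := pv_other_marker 'T' 'O' ('h' :: "ought ".toList) l (by decide) hs
            have hA2 := pv_other_marker 'A' 'O' ('c' :: "tion ".toList) l (by decide) hs
            have hlb : pvLineB ('O' :: l) = true ↔
                (('b' :: "servation ".toList).isPrefixOf l = true ∧
                  (l.drop ('b' :: "servation ".toList).length).any PySem.Chars.isdigit = true) := by
              simp only [pvLineB]
              simp only [List.any_cons, List.any_nil, Bool.or_false, Bool.or_eq_true,
                Bool.and_eq_true, PySem.Chars.startswith]
              rw [show (("Thought" ++ " ").toList) = 'T' :: 'h' :: "ought ".toList from by decide,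
                show (("Action" ++ " ").toList) = 'A' :: 'c' :: "tion ".toList from by decide,
                show (("Observation" ++ " ").toList) = 'O' :: 'b' :: "servation ".toList from by decide]
              constructor
              · rintro (⟨h1, _⟩ | ⟨h1, _⟩ | ⟨h1, h2⟩)
                · exact absurd h1 hT2
                · exact absurd h1 hA2
                · exact hiff.mp ⟨h1, h2⟩
              · intro hx
                exact Or.inr (Or.inr (hiff.mpr hx))
            rw [if_congr hlb.symm rfl rfl]
          · rw [if_neg hT, if_neg hA', if_neg hO', pv_runDead l h' c r]
            have hT2 := pv_other_marker 'T' a ('h' :: "ought ".toList) l (fun hh => hT hh.symm) hs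
            have hA2 := pv_other_marker 'A' a ('c' :: "tion ".toList) l (fun hh => hA' hh.symm) hs
            have hO2 := pv_other_marker 'O' a ('b' :: "servation ".toList) l (fun hh => hO' hh.symm) hs
            have hlb : pvLineB (a :: l) = false := by
              simp only [pvLineB]
              simp only [List.any_cons, List.any_nil, Bool.or_false, PySem.Chars.startswith]
              rw [show (("Thought" ++ " ").toList) = 'T' :: 'h' :: "ought ".toList from by decide,
                show (("Action" ++ " ").toList) = 'A' :: 'c' :: "tion ".toList from by decide,
                show (("Observation" ++ " ").toList) = 'O' :: 'b' :: "servation ".toList from by decide]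
              simp only [Bool.or_eq_false_iff, Bool.and_eq_false_iff]
              exact ⟨Or.inl (eq_false_of_ne_true hT2), Or.inl (eq_false_of_ne_true hA2),
                Or.inl (eq_false_of_ne_true hO2)⟩
            rw [hlb]
            simp

theorem pv_main (n : Nat) (s : List Char) (hn : s.length = n) (c : Int) (r : List Char) :
    List.foldl pvStep (c, 0, r) (s ++ ['\n'])
      = (c + (List.countP pvLineB (pvLines s) : Int), 0, []) := by
  induction n using Nat.strong_induction_on generalizing s c r with
  | _ n ih =>
    subst hn
    cases hdw : s.dropWhile (fun ch => !(ch == '\n')) with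
    | nil =>
      have hs : s.takeWhile (fun ch => !(ch == '\n')) = s := by
        conv_rhs => rw [← List.takeWhile_append_dropWhile (p := fun ch => !(ch == '\n')) (l := s)]
        rw [hdw, List.append_nil]
      have hnl : '\n' ∉ s := by
        intro hm
        rw [← hs] at hm
        have := List.mem_takeWhile_imp hm
        simp at this
      rw [pv_run0 s hnl c r, pvLines, pvSplit_no_nl s hnl]
      simp [List.countP_cons]
    | cons d rest =>
      have hne : s.dropWhile (fun ch => !(ch == '\n')) ≠ [] := by rw [hdw]; simp
      have hd : d = '\n' := by
        have h1 := List.head_dropWhile_not (fun ch => !(ch == '\n')) hne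
        simp only [hdw, List.head_cons] at h1
        simpa using h1
      subst hd
      have hs : s = s.takeWhile (fun ch => !(ch == '\n')) ++ '\n' :: rest := by
        conv_lhs => rw [← List.takeWhile_append_dropWhile (p := fun ch => !(ch == '\n')) (l := s)]
        rw [hdw]
      have hna : '\n' ∉ s.takeWhile (fun ch => !(ch == '\n')) := by
        intro hm
        have := List.mem_takeWhile_imp hm
        simp at this
      have hlen : rest.length < s.length := by
        conv_rhs => rw [hs]
        simp
        omega
      conv_lhs => rw [hs]
      rw [show (s.takeWhile (fun ch => !(ch == '\n')) ++ '\n' :: rest) ++ ['\n']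
            = (s.takeWhile (fun ch => !(ch == '\n')) ++ ['\n']) ++ (rest ++ ['\n']) from by simp]
      rw [List.foldl_append, pv_run0 _ hna c r,
        ih rest.length hlen rest rfl _ []]
      conv_rhs => rw [hs]
      simp only [pvLines, pvSplit_append _ rest hna, List.countP_cons]
      push_cast
      by_cases hb : pvLineB (s.takeWhile (fun ch => !(ch == '\n'))) = true <;>
        simp [hb] <;> ring

-- ===== VERDICT (by name: the statement is the Claim_ definition above) =====
theorem pv_apred_eq : (fun (acc : Int) (line : String) =>
      let line := PySem.Str.strip line
      if ["Thought", "Action", "Observation"].any (fun marker =>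
            PySem.Str.startswith line (marker ++ " ") && line.toList.any PySem.Chars.isdigit)
      then acc + 1 else acc)
    = (fun (acc : Int) (line : String) => if pvLineB line.toList then acc + 1 else acc) := by
  funext acc line
  simp [pvLineB]

theorem get_step_number_py_spec : Claim_equal_get_step_number_py := by
  intro context _
  unfold Spec_get_step_number_py get_step_number_py get_step_number_py_alt
  by_cases hc : context = ""
  · subst hc
    decide
  · rw [if_neg hc]
    have hBlist : (context ++ "\n").toList = context.toList ++ ['\n'] := by
      simp
    rw [hBlist, pv_main context.toList.length context.toList rfl 0 []]
    obtain ⟨L, hL⟩ : ∃ L, PySem.Str.split? context "\n" = some L := by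
      have h2 := PySem.Str.split?_map context "\n"
      cases h : PySem.Str.split? context "\n" with
      | some L => exact ⟨L, rfl⟩
      | none =>
        rw [h] at h2
        rw [PySem.Chars.split?] at h2
        simp at h2
    have hmap : L.map String.toList = pvLines context.toList := by
      have h2 := PySem.Str.split?_map context "\n"
      rw [hL] at h2
      have hsep : PySem.Chars.split? context.toList ("\n" : String).toList
          = some (PySem.Chars.splitOn context.toList ['\n']) := by
        rw [show ("\n" : String).toList = ['\n'] from by decide]
        rfl
      rw [hsep, pvSplitOn_eq] at h2
      simp only [Option.map_some, Option.some_inj] at h2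
      simpa [pvLines] using h2
    rw [hL]
    simp only [Option.getD_some]
    rw [pv_apred_eq, PySem.List.foldl_if_add_one]
    have hcount : L.countP (fun line => pvLineB line.toList)
        = (pvLines context.toList).countP pvLineB := by
      rw [← hmap, List.countP_map]
      rfl
    rw [hcount]
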